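-- pv_equiv track=rewrite | github.com/GowrishankarSMenon/YODHA-HACKATHON | backend/ai/ai_engine.py | merge_broken_lines
-- ===== SOURCE A (Python) =====
-- from typing import List, Tuple
--
-- def merge_broken_lines(lines: List[str]) -> List[str]:
--     """Merge lines that were incorrectly split"""
--     if not lines:
--         return lines
--
--     merged = []
--     current = lines[0]
--
--     for i in range(1, len(lines)):
--         # If current line doesn't end with punctuation and next line doesn't start with capital
--         if (current and not current[-1] in '.!?:;,' and
--             lines[i] and len(lines[i]) > 0 and
--             lines[i][0].islower()):
--             current += " " + lines[i]
--         else: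
--             merged.append(current)
--             current = lines[i]
--
--     merged.append(current)
--     return merged
-- ===== SOURCE B (Python) =====
-- def merge_broken_lines(lines):
--     """Merge lines that were incorrectly split (right-to-left fold over groups)."""
--     if not lines:
--         return lines
--     groups = []
--     for line in reversed(lines):
--         if groups and line and line[-1] not in '.!?:;,' and groups[-1][-1][:1].islower():
--             groups[-1].append(line)
--         else:
--             groups.append([line])
--     groups.reverse()
--     return [' '.join(reversed(g)) for g in groups]
-- ===== Notes on version B (the rewrite author's own statement) =====
-- stated objective: alternative
-- what changed: Replaces A's left-to-right scan that grows a 'current' accumulator string and flushes it at each boundary by a single right-to-left fold that collects groups of consecutive lines (extending the group ahead or opening a new one) and space-joins each group once at the end.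
import Mathlib
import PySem

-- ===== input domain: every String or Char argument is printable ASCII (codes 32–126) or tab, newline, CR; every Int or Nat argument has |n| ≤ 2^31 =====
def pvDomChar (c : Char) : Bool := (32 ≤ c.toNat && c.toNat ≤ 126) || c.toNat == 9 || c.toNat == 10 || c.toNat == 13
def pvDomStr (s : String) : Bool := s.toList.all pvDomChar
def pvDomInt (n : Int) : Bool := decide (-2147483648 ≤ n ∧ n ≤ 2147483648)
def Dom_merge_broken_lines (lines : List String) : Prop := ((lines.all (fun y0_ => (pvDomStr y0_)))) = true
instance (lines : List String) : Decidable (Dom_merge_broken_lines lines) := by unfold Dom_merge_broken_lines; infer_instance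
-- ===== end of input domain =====

-- B replaces A's left-to-right scan with a growing 'current' accumulator string by a single
-- right-to-left fold that collects groups of lines and joins each group once at the end
-- (objective: alternative decomposition).

-- ===== PORT A =====
-- the punctuation string '.!?:;,'
def pvPunct : List Char := ['.', '!', '?', ':', ';', ',']

-- A's merge test: `current and not current[-1] in '.!?:;,' and lines[i] and lines[i][0].islower()`
-- (current[-1] via getLast?; the single-character `in` test is membership in pvPunct)
def pvCondA (current li : List Char) : Bool :=
  match current.getLast?, li with
  | some c, d :: _ => !(PySem.Chars.isIn [c] pvPunct) && PySem.Chars.islower d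
  | _, _ => false

-- A's loop body on the fetched line li = lines[i]: merge into current or flush current
def pvBodyA (s : List (List Char) × List Char) (li : List Char) : List (List Char) × List Char :=
  if pvCondA s.2 li then (s.1, s.2 ++ ' ' :: li)
  else (s.1 ++ [s.2], li)

def merge_broken_lines (lines : List String) : List String :=
  if lines = [] then lines
  else
    let ls := lines.map String.toList
    let st := (PySem.List.pyRange 1 (PySem.List.len ls) 1).foldl
      (fun s i => pvBodyA s (PySem.List.pyGetD ls i []))   -- i ∈ range(1, len) is always in range
      ([], PySem.List.pyGetD ls 0 [])                      -- (merged, current = lines[0])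
    (st.1 ++ [st.2]).map String.ofList

-- ===== PORT B =====
-- one step of B's reversed loop (foldr = iterate reversed, building the result front-first,
-- so each group is kept in forward order — the mirror of Source B's append-then-reverse):
-- extend the group in front with the line, or open a new singleton group
def pvStepB (line : List Char) (groups : List (List (List Char))) : List (List (List Char)) :=
  match groups with
  | g :: rest =>
    if (match line.getLast? with        -- `line and line[-1] not in '.!?:;,'`
        | some c => !(PySem.Chars.isIn [c] pvPunct)
        | none => false)
       && (match g with                  -- `groups[-1][-1][:1].islower()`: the group ahead starts lowercase
           | f :: _ => (match f with | d :: _ => PySem.Chars.islower d | [] => false)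
           | [] => false)
    then (line :: g) :: rest
    else [line] :: g :: rest
  | [] => [[line]]

def merge_broken_lines_alt (lines : List String) : List String :=
  if lines = [] then lines
  else ((lines.map String.toList).foldr pvStepB []).map
        (fun g => String.ofList (PySem.Chars.join [' '] g))   -- `' '.join(...)` per group

-- ===== PRECONDITION & SPEC =====
def Spec_merge_broken_lines (lines : List String) (out : List String) : Prop := out = merge_broken_lines_alt lines
instance (lines : List String) (out : List String) : Decidable (Spec_merge_broken_lines lines out) := by unfold Spec_merge_broken_lines; infer_instance

-- ===== CLAIM (what is proved, stated in full; the proofs are below) =====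
def Claim_equal_merge_broken_lines : Prop := ∀ (lines : List String), Dom_merge_broken_lines lines → Spec_merge_broken_lines lines (merge_broken_lines lines)

-- ===== LEMMAS AND PROOFS =====

-- A's loop as a structural recursion (proof helper)
def pvMergeA (c : List Char) : List (List Char) → List (List Char)
  | [] => [c]
  | x :: xs => if pvCondA c x then pvMergeA (c ++ ' ' :: x) xs else c :: pvMergeA x xs

-- B's step acting on joined strings rather than on groups (proof helper)
def pvGlue (line : List Char) (merged : List (List Char)) : List (List Char) :=
  match merged with
  | g :: rest =>
    if (match line.getLast? with
        | some c => !(PySem.Chars.isIn [c] pvPunct)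
        | none => false)
       && (match g with | d :: _ => PySem.Chars.islower d | [] => false)
    then (line ++ ' ' :: g) :: rest
    else line :: g :: rest
  | [] => [line]

-- joining one group with single spaces
def pvJoin (g : List (List Char)) : List Char := PySem.Chars.join [' '] g

lemma pvFoldA (rest : List (List Char)) : ∀ (m : List (List Char)) (c : List Char),
    (let st := rest.foldl pvBodyA (m, c)
     st.1 ++ [st.2]) = m ++ pvMergeA c rest := by
  induction rest with
  | nil => intro m c; simp [pvMergeA]
  | cons x xs ih =>
    intro m c
    simp only [List.foldl_cons, pvMergeA, pvBodyA]
    by_cases h : pvCondA c x = true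
    · rw [if_pos h, if_pos h]; exact ih m (c ++ ' ' :: x)
    · rw [if_neg h, if_neg h, ih (m ++ [c]) x]; simp

-- pvCondA depends on its first argument only through getLast?
lemma pvCondA_congr_last (c c' x : List Char) (h : c.getLast? = c'.getLast?) :
    pvCondA c x = pvCondA c' x := by
  unfold pvCondA; rw [h]

-- pvCondA depends on its second argument only through head?
lemma pvCondA_congr_head (c x y : List Char) (h : x.head? = y.head?) :
    pvCondA c x = pvCondA c y := by
  cases hl : c.getLast? <;> cases x <;> cases y <;> simp_all [pvCondA]

-- pvCondA as the conjunction of its two independent tests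
lemma pvCondA_eq_and (c x : List Char) :
    pvCondA c x =
      ((match c.getLast? with
        | some ch => !(PySem.Chars.isIn [ch] pvPunct)
        | none => false)
       && (match x with | d :: _ => PySem.Chars.islower d | [] => false)) := by
  cases hl : c.getLast? <;> cases x <;> simp [pvCondA, hl]

-- pvGlue on a nonempty accumulator is decided by pvCondA
lemma pvGlue_cons (line g : List Char) (rest : List (List Char)) :
    pvGlue line (g :: rest) =
      if pvCondA line g then (line ++ ' ' :: g) :: rest else line :: g :: rest := by
  unfold pvGlue pvCondA
  cases hl : line.getLast? <;> cases g <;> simp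

lemma pvCondA_ne_nil₁ {c x : List Char} (h : pvCondA c x = true) : c ≠ [] := by
  unfold pvCondA at h
  cases hl : c.getLast? with
  | none => rw [hl] at h; cases x <;> simp at h
  | some _ => intro hc; subst hc; simp at hl

lemma pvCondA_ne_nil₂ {c x : List Char} (h : pvCondA c x = true) : x ≠ [] := by
  unfold pvCondA at h
  cases x with
  | nil => cases hl : c.getLast? <;> rw [hl] at h <;> simp at h
  | cons d t => simp

-- the first group produced by a pvGlue step starts with the first character of the line stepped in
lemma pvGlue_head (x : List Char) (fb : List (List Char)) :
    ∃ g r, pvGlue x fb = g :: r ∧ g.head? = x.head? := by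
  cases fb with
  | nil => exact ⟨x, [], rfl, rfl⟩
  | cons g₀ r₀ =>
    rw [pvGlue_cons]
    by_cases h : pvCondA x g₀ = true
    · refine ⟨x ++ ' ' :: g₀, r₀, by simp [h], ?_⟩
      have hx : x ≠ [] := pvCondA_ne_nil₁ h
      cases x with
      | nil => exact absurd rfl hx
      | cons a t => simp
    · exact ⟨x, g₀ :: r₀, by simp [h], rfl⟩

-- a merged line glues in one go: glue c (glue x fb) = glue (c + ' ' + x) fb when A would merge
lemma pvGlue_glue (c x : List Char) (fb : List (List Char)) (h : pvCondA c x = true) :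
    pvGlue c (pvGlue x fb) = pvGlue (c ++ ' ' :: x) fb := by
  have hx : x ≠ [] := pvCondA_ne_nil₂ h
  have hlast : (c ++ ' ' :: x).getLast? = x.getLast? := by
    cases x with
    | nil => exact absurd rfl hx
    | cons a t =>
      rw [List.getLast?_append_of_ne_nil _ (by simp : (' ' :: a :: t) ≠ []),
        List.getLast?_cons_cons]
  cases fb with
  | nil =>
    show pvGlue c [x] = pvGlue (c ++ ' ' :: x) []
    rw [pvGlue_cons]
    simp [h]
    rfl
  | cons g r =>
    rw [pvGlue_cons x g r]
    by_cases hxg : pvCondA x g = true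
    · rw [if_pos hxg, pvGlue_cons, pvGlue_cons]
      have h1 : pvCondA c (x ++ ' ' :: g) = pvCondA c x := by
        apply pvCondA_congr_head
        cases x with
        | nil => exact absurd rfl hx
        | cons a t => simp
      have h2 : pvCondA (c ++ ' ' :: x) g = pvCondA x g := pvCondA_congr_last _ _ _ hlast
      rw [h1, h, h2, hxg]
      simp
    · rw [if_neg hxg, pvGlue_cons, pvGlue_cons]
      have h2 : pvCondA (c ++ ' ' :: x) g = pvCondA x g := pvCondA_congr_last _ _ _ hlast
      rw [h, h2, eq_false_of_ne_true hxg]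
      simp

-- main bridge on the glue side: A's recursion equals one more glue step on the right fold
lemma pvMain (xs : List (List Char)) : ∀ c, pvMergeA c xs = pvGlue c (List.foldr pvGlue [] xs) := by
  induction xs with
  | nil => intro c; rfl
  | cons x xs ih =>
    intro c
    by_cases h : pvCondA c x = true
    · rw [show pvMergeA c (x :: xs) = pvMergeA (c ++ ' ' :: x) xs from by simp [pvMergeA, h]]
      rw [ih (c ++ ' ' :: x), List.foldr_cons, pvGlue_glue c x _ h]
    · rw [show pvMergeA c (x :: xs) = c :: pvMergeA x xs from by simp [pvMergeA, h]]
      rw [ih x, List.foldr_cons]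
      obtain ⟨g, r, hgr, hhead⟩ := pvGlue_head x (List.foldr pvGlue [] xs)
      rw [hgr, pvGlue_cons]
      have : pvCondA c g = pvCondA c x := pvCondA_congr_head _ _ _ hhead
      rw [this, eq_false_of_ne_true h]
      simp

-- joining a group of at least two lines
lemma pvJoin_cons (l : List Char) (g : List (List Char)) (hg : g ≠ []) :
    pvJoin (l :: g) = l ++ ' ' :: pvJoin g := by
  cases g with
  | nil => exact absurd rfl hg
  | cons q r => simp [pvJoin, PySem.Chars.join_cons_cons]

-- the lowercase test on a joined nonempty group is the test on its first line
lemma pvJoin_headlower (f : List Char) (t : List (List Char)) :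
    (match pvJoin (f :: t) with | d :: _ => PySem.Chars.islower d | [] => false)
      = (match f with | d :: _ => PySem.Chars.islower d | [] => false) := by
  cases t with
  | nil => rw [show pvJoin [f] = f from PySem.Chars.join_singleton [' '] f]
  | cons q r =>
    rw [pvJoin_cons f (q :: r) (by simp)]
    cases f with
    | nil => simp; decide
    | cons d f' => simp

-- pvCondA ignores everything of a joined group but its first line
lemma pvCondA_join (line f : List Char) (t : List (List Char)) :
    pvCondA line (pvJoin (f :: t)) = pvCondA line f := by
  rw [pvCondA_eq_and, pvCondA_eq_and, pvJoin_headlower]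

-- B's step on a nonempty front group is decided by pvCondA on the group's first line
lemma pvStepB_cons (line f : List Char) (t : List (List Char)) (r : List (List (List Char))) :
    pvStepB line ((f :: t) :: r) =
      if pvCondA line f then (line :: f :: t) :: r else [line] :: (f :: t) :: r := by
  unfold pvStepB pvCondA
  cases hl : line.getLast? <;> cases f <;> simp

-- every group built by B's fold is nonempty
lemma pvFoldrB_wf (xs : List (List Char)) :
    ∀ g ∈ List.foldr pvStepB [] xs, g ≠ [] := by
  induction xs with
  | nil => simp
  | cons x xs ih =>
    rw [List.foldr_cons]
    cases hfb : List.foldr pvStepB [] xs with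
    | nil => simp [pvStepB]
    | cons g0 r =>
      have hg0 : g0 ≠ [] := ih g0 (by rw [hfb]; simp)
      obtain ⟨f, t, rfl⟩ : ∃ f t, g0 = f :: t := by
        cases g0 with
        | nil => exact absurd rfl hg0
        | cons f t => exact ⟨f, t, rfl⟩
      rw [pvStepB_cons]
      intro g hg
      split_ifs at hg with hc
      · rcases List.mem_cons.mp hg with h1 | h1
        · subst h1; simp
        · exact ih g (by rw [hfb]; exact List.mem_cons_of_mem _ h1)
      · rcases List.mem_cons.mp hg with h1 | h1
        · subst h1; simp
        · exact ih g (by rw [hfb]; exact h1)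

-- one B step, joined, is one glue step on the joined groups
lemma pvStepB_join (line : List Char) (fb : List (List (List Char)))
    (h : ∀ g ∈ fb, g ≠ []) :
    (pvStepB line fb).map pvJoin = pvGlue line (fb.map pvJoin) := by
  cases fb with
  | nil => simp [pvStepB, pvGlue, pvJoin, PySem.Chars.join_singleton]
  | cons g r =>
    obtain ⟨f, t, rfl⟩ : ∃ f t, g = f :: t := by
      cases g with
      | nil => exact absurd rfl (h [] (by simp))
      | cons f t => exact ⟨f, t, rfl⟩
    rw [pvStepB_cons, List.map_cons, pvGlue_cons, pvCondA_join]
    split_ifs with hc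
    · rw [List.map_cons, pvJoin_cons line (f :: t) (by simp)]
    · rw [List.map_cons, List.map_cons,
        show pvJoin [line] = line from PySem.Chars.join_singleton [' '] line]

-- B's whole fold, joined, is the glue fold
lemma pvFoldrB_join (xs : List (List Char)) :
    (List.foldr pvStepB [] xs).map pvJoin = List.foldr pvGlue [] xs := by
  induction xs with
  | nil => rfl
  | cons x xs ih =>
    rw [List.foldr_cons, List.foldr_cons, pvStepB_join x _ (pvFoldrB_wf xs), ih]

-- ===== VERDICT (by name: the statement is the Claim_ definition above) =====
theorem merge_broken_lines_spec : Claim_equal_merge_broken_lines := by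
  intro lines _
  unfold Spec_merge_broken_lines merge_broken_lines merge_broken_lines_alt
  cases lines with
  | nil => rfl
  | cons l rest =>
    simp only [if_neg (List.cons_ne_nil l rest), List.map_cons]
    rw [PySem.List.foldl_pyRange_pyGetD (l.toList :: rest.map String.toList) [] pvBodyA
          ([], PySem.List.pyGetD (l.toList :: rest.map String.toList) 0 [])
          (by norm_num : (0 : Int) ≤ 1)]
    have := pvFoldA ((l.toList :: rest.map String.toList).drop (1 : Int).toNat) []
      (PySem.List.pyGetD (l.toList :: rest.map String.toList) 0 [])
    simp only at this
    rw [this]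
    simp only [PySem.List.pyGetD_zero_cons, Int.toNat_one, List.drop_one, List.tail_cons,
      List.nil_append]
    rw [show (fun g => String.ofList (PySem.Chars.join [' '] g)) = String.ofList ∘ pvJoin from rfl,
      ← List.map_map, List.foldr_cons, pvStepB_join _ _ (pvFoldrB_wf (rest.map String.toList)),
      pvFoldrB_join (rest.map String.toList),
      pvMain (rest.map String.toList) l.toList]
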